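-- pv_equiv track=rewrite | github.com/truEngineer/made_ads | week2/task_D.py | calc_substr_count
-- ===== SOURCE A (Python) =====
-- def count_letters(string):
--     hist = [0] * 26  # number of letters
--     for let in string:
--         hist[ord(let) - 97] += 1  # ord('a') = 97
--     return hist
--
-- def calc_substr_count(string, strlen, cards):
--     result = 0
--     beg, end = 0, 1  # sliding window (substring)
--     crds_hist = count_letters(cards)  # cards histogram
--     subs_hist = count_letters(string[0])  # current substring histogram
--
--     while end < strlen + 1:
--         # last char 'ord' in the current substring
--         ord_ch = ord(string[end - 1])
--
--         if subs_hist[ord_ch - 97] > crds_hist[ord_ch - 97]: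
--             beg += 1  # update substring begin
--             # delete char from current substring hist
--             subs_hist[ord(string[beg - 1]) - 97] -= 1
--         else:
--             # increment number of matching substrings
--             result += end - beg
--             end += 1  # update substring end
--             if end < strlen + 1:
--                 # add char to current substring hist
--                 subs_hist[ord(string[end - 1]) - 97] += 1
--     return result
-- ===== SOURCE B (Python) =====
-- def calc_substr_count(string, strlen, cards):
--     # Brute force: count every window string[beg:end] (0 <= beg < end <= strlen)
--     # whose letter histogram fits inside the cards histogram.
--     crds_hist = [0] * 26
--     for let in cards:
--         crds_hist[ord(let) - 97] += 1
--     result = 0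
--     for beg in range(strlen):
--         subs_hist = [0] * 26
--         for end in range(beg, strlen):
--             subs_hist[ord(string[end]) - 97] += 1
--             if all(subs_hist[j] <= crds_hist[j] for j in range(26)):
--                 result += 1
--     return result
-- ===== Notes on version B (the rewrite author's own statement) =====
-- stated objective: simpler
-- what changed: A's sliding two-pointer window with incremental histogram updates is replaced by a plain brute force: for each start index a fresh 26-slot histogram is grown one character at a time and fully compared against the cards histogram for every window.
import Mathlib
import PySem

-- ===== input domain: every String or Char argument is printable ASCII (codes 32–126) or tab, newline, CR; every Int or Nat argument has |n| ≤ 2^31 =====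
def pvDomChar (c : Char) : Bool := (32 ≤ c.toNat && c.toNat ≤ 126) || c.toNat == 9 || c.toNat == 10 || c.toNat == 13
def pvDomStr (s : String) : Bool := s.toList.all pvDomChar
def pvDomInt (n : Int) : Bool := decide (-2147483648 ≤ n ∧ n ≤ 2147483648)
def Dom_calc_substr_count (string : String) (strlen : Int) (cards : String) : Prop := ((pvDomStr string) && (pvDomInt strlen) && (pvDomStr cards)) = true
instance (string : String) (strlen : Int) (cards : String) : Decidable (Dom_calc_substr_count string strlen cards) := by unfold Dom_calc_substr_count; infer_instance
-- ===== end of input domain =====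

-- B replaces A's sliding window by a plain brute force: one fresh histogram per start
-- index and a full 26-slot comparison per window (alternative decomposition, not faster).

-- ===== PORT A =====
-- hist[ord(let) - 97] += 1 : pySetD/pyGetD give Python's negative-index wraparound exactly;
-- an index outside [-26, 25] is an IndexError in Python, excluded by Pre_.
def count_letters (string : List Char) : List Int :=
  string.foldl (fun hist let_ =>
      PySem.List.pySetD hist ((let_.toNat : Int) - 97)
        (PySem.List.pyGetD hist ((let_.toNat : Int) - 97) 0 + 1))
    (List.replicate 26 0)

-- the while loop of A; fuel only makes the recursion total (never exhausted under Pre_,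
-- where the loop performs at most strlen shrink steps and strlen count steps)
def pvLoopA (s : List Char) (strlen : Int) (crds_hist : List Int) :
    Nat → Int → Int → Int → List Int → Int
  | 0, result, _, _, _ => result
  | fuel + 1, result, beg, en, subs_hist =>
    if en < strlen + 1 then
      -- ord_ch = ord(string[end - 1])  (IndexError excluded by Pre_)
      let ord_ch : Int := ((PySem.List.pyGetD s (en - 1) 'a').toNat : Int)
      if PySem.List.pyGetD subs_hist (ord_ch - 97) 0 > PySem.List.pyGetD crds_hist (ord_ch - 97) 0 then
        let beg' := beg + 1
        pvLoopA s strlen crds_hist fuel result beg' en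
          (PySem.List.pySetD subs_hist (((PySem.List.pyGetD s (beg' - 1) 'a').toNat : Int) - 97)
            (PySem.List.pyGetD subs_hist (((PySem.List.pyGetD s (beg' - 1) 'a').toNat : Int) - 97) 0 - 1))
      else
        let result' := result + en - beg
        let en' := en + 1
        pvLoopA s strlen crds_hist fuel result' beg en'
          (if en' < strlen + 1 then
            PySem.List.pySetD subs_hist (((PySem.List.pyGetD s (en' - 1) 'a').toNat : Int) - 97)
              (PySem.List.pyGetD subs_hist (((PySem.List.pyGetD s (en' - 1) 'a').toNat : Int) - 97) 0 + 1)
          else subs_hist)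
    else result

def calc_substr_count (string : String) (strlen : Int) (cards : String) : Int :=
  let s := string.toList
  let crds_hist := count_letters cards.toList
  -- string[0] is a one-character string (IndexError on "" excluded by Pre_)
  let subs_hist := count_letters (((PySem.List.pyGet? s 0).map (fun c => [c])).getD [])
  pvLoopA s strlen crds_hist ((2 * strlen + 2).toNat + 1) 0 0 1 subs_hist

-- ===== PORT B =====
def calc_substr_count_alt (string : String) (strlen : Int) (cards : String) : Int :=
  let s := string.toList
  let crds_hist := cards.toList.foldl (fun hist let_ =>
      PySem.List.pySetD hist ((let_.toNat : Int) - 97)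
        (PySem.List.pyGetD hist ((let_.toNat : Int) - 97) 0 + 1))
    (List.replicate 26 (0 : Int))
  (PySem.List.pyRange 0 strlen 1).foldl (fun result beg =>
    ((PySem.List.pyRange beg strlen 1).foldl (fun st en =>
        let subs_hist := PySem.List.pySetD st.1 (((PySem.List.pyGetD s en 'a').toNat : Int) - 97)
          (PySem.List.pyGetD st.1 (((PySem.List.pyGetD s en 'a').toNat : Int) - 97) 0 + 1)
        if (PySem.List.pyRange 0 26 1).all
            (fun j => PySem.List.pyGetD subs_hist j 0 ≤ PySem.List.pyGetD crds_hist j 0)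
        then (subs_hist, st.2 + 1) else (subs_hist, st.2))
      (List.replicate 26 (0 : Int), result)).2) 0

-- ===== PRECONDITION & SPEC =====
-- Pre_ = exactly the inputs on which A returns: nonempty string, strlen ≤ len(string), and
-- every character A histograms (all of cards, string[0], and string[0:strlen]) has code
-- 71..122 — any other code makes hist[ord(c) - 97] an IndexError in Python.
def Pre_calc_substr_count (string : String) (strlen : Int) (cards : String) : Prop :=
  string.toList ≠ [] ∧ strlen ≤ (string.toList.length : Int) ∧
  cards.toList.all (fun c => 71 ≤ c.toNat && c.toNat ≤ 122) = true ∧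
  (string.toList.take (max 1 strlen.toNat)).all (fun c => 71 ≤ c.toNat && c.toNat ≤ 122) = true
instance (string : String) (strlen : Int) (cards : String) : Decidable (Pre_calc_substr_count string strlen cards) := by unfold Pre_calc_substr_count; infer_instance

def pvWitness_calc_substr_count : String × Int × String := ("g", 1, "")

def Spec_calc_substr_count (string : String) (strlen : Int) (cards : String) (out : Int) : Prop := out = calc_substr_count_alt string strlen cards
instance (string : String) (strlen : Int) (cards : String) (out : Int) : Decidable (Spec_calc_substr_count string strlen cards out) := by unfold Spec_calc_substr_count; infer_instance

-- ===== CLAIM (what is proved, stated in full; the proofs are below) =====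
def Claim_equal_calc_substr_count : Prop := ∀ (string : String) (strlen : Int) (cards : String), Dom_calc_substr_count string strlen cards → Pre_calc_substr_count string strlen cards → Spec_calc_substr_count string strlen cards (calc_substr_count string strlen cards)

-- ===== LEMMAS AND PROOFS =====

def pvCls (c : Char) : Nat := (c.toNat - 71) % 26
def pvCnt (j : Nat) (w : List Char) : Nat := w.countP (fun c => pvCls c = j)
def pvHistL (w : List Char) : List Int := (List.range 26).map (fun j => (pvCnt j w : Nat))
def pvWin (s : List Char) (b e : Nat) : List Char := (s.take e).drop b
def pvValidB (s L : List Char) (b e : Nat) : Bool :=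
  (List.range 26).all (fun j => pvCnt j (pvWin s b e) ≤ pvCnt j L)

lemma pvCls_lt (c : Char) : pvCls c < 26 := Nat.mod_lt _ (by norm_num)

lemma pvIdx_eq (c : Char) (h1 : 71 ≤ c.toNat) (h2 : c.toNat ≤ 122) :
    PySem.List.pyIdx? 26 ((c.toNat : Int) - 97) = some (pvCls c) := by
  simp only [PySem.List.pyIdx?, pvCls]
  split_ifs with ha hb hc <;> [skip; omega; skip; omega]
  · congr 1; omega
  · congr 1; omega

lemma pvGetD_hist (hist : List Int) (hl : hist.length = 26) (c : Char)
    (h1 : 71 ≤ c.toNat) (h2 : c.toNat ≤ 122) :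
    PySem.List.pyGetD hist ((c.toNat : Int) - 97) 0 = hist.getD (pvCls c) 0 := by
  simp [PySem.List.pyGetD, PySem.List.pyGet?, hl, pvIdx_eq c h1 h2, List.getD_eq_getElem?_getD]

lemma pvSetD_hist (hist : List Int) (hl : hist.length = 26) (c : Char)
    (h1 : 71 ≤ c.toNat) (h2 : c.toNat ≤ 122) (v : Int) :
    PySem.List.pySetD hist ((c.toNat : Int) - 97) v = hist.set (pvCls c) v := by
  simp [PySem.List.pySetD, PySem.List.pySet?, hl, pvIdx_eq c h1 h2]

lemma pvHistL_length (w : List Char) : (pvHistL w).length = 26 := by simp [pvHistL]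

lemma pvHistL_getD (w : List Char) (j : Nat) (hj : j < 26) :
    (pvHistL w).getD j 0 = (pvCnt j w : Int) := by
  simp [pvHistL, List.getD_eq_getElem?_getD, hj]

lemma pvHistL_nil : pvHistL [] = List.replicate 26 0 := by
  simp [pvHistL, pvCnt, List.map_const']

lemma pvHistL_snoc (w : List Char) (c : Char) (h1 : 71 ≤ c.toNat) (h2 : c.toNat ≤ 122) :
    PySem.List.pySetD (pvHistL w) ((c.toNat : Int) - 97)
      (PySem.List.pyGetD (pvHistL w) ((c.toNat : Int) - 97) 0 + 1) = pvHistL (w ++ [c]) := by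
  rw [pvSetD_hist _ (pvHistL_length w) c h1 h2, pvGetD_hist _ (pvHistL_length w) c h1 h2,
    pvHistL_getD _ _ (pvCls_lt c)]
  apply List.ext_getElem
  · simp [pvHistL]
  · intro i hi1 hi2
    simp only [pvHistL, List.length_set, List.length_map, List.length_range] at hi1
    rw [List.getElem_set]
    simp only [pvHistL, List.getElem_map, List.getElem_range]
    unfold pvCnt
    rw [List.countP_append]
    by_cases h : pvCls c = i
    · subst h; rw [if_pos rfl]; simp
    · rw [if_neg h]
      have : (decide (pvCls c = i)) = false := by simpa using h
      simp [this]

lemma pvHistL_uncons (w : List Char) (c : Char) (h1 : 71 ≤ c.toNat) (h2 : c.toNat ≤ 122) :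
    PySem.List.pySetD (pvHistL (c :: w)) ((c.toNat : Int) - 97)
      (PySem.List.pyGetD (pvHistL (c :: w)) ((c.toNat : Int) - 97) 0 - 1) = pvHistL w := by
  rw [pvSetD_hist _ (pvHistL_length _) c h1 h2, pvGetD_hist _ (pvHistL_length _) c h1 h2,
    pvHistL_getD _ _ (pvCls_lt c)]
  apply List.ext_getElem
  · simp [pvHistL]
  · intro i hi1 hi2
    simp only [pvHistL, List.length_set, List.length_map, List.length_range] at hi1
    rw [List.getElem_set]
    simp only [pvHistL, List.getElem_map, List.getElem_range]
    unfold pvCnt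
    rw [List.countP_cons]
    by_cases h : pvCls c = i
    · subst h; rw [if_pos rfl]; simp
    · rw [if_neg h]
      have : (decide (pvCls c = i)) = false := by simpa using h
      rw [List.countP_cons]; simp [this]

lemma pvFoldl_bump (w : List Char) (hg : ∀ c ∈ w, 71 ≤ c.toNat ∧ c.toNat ≤ 122) :
    w.foldl (fun hist let_ =>
      PySem.List.pySetD hist ((let_.toNat : Int) - 97)
        (PySem.List.pyGetD hist ((let_.toNat : Int) - 97) 0 + 1))
      (List.replicate 26 0) = pvHistL w := by
  rw [← pvHistL_nil]
  suffices H : ∀ (w u : List Char), (∀ c ∈ w, 71 ≤ c.toNat ∧ c.toNat ≤ 122) →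
      w.foldl (fun hist let_ =>
        PySem.List.pySetD hist ((let_.toNat : Int) - 97)
          (PySem.List.pyGetD hist ((let_.toNat : Int) - 97) 0 + 1)) (pvHistL u) = pvHistL (u ++ w) by
    simpa using H w [] hg
  intro w
  induction w with
  | nil => simp
  | cons c w ih =>
    intro u hg'
    have hc := hg' c (by simp)
    simp only [List.foldl_cons]
    rw [pvHistL_snoc u c hc.1 hc.2, ih (u ++ [c]) (fun x hx => hg' x (by simp [hx]))]
    simp

lemma pvWin_nil (s : List Char) (b e : Nat) (h : e ≤ b) : pvWin s b e = [] := by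
  apply List.drop_eq_nil_of_le
  simp; omega

lemma pvWin_cons (s : List Char) (b e : Nat) (hb : b < e) (he : e ≤ s.length) :
    pvWin s b e = s[b]'(by omega) :: pvWin s (b + 1) e := by
  unfold pvWin
  rw [List.drop_eq_getElem_cons (by simp; omega)]
  congr 1
  rw [List.getElem_take]

lemma pvWin_snoc (s : List Char) (b e : Nat) (hb : b ≤ e) (he : e < s.length) :
    pvWin s b (e + 1) = pvWin s b e ++ [s[e]'he] := by
  unfold pvWin
  rw [List.take_add_one, List.drop_append_of_le_length (by simp; omega)]
  simp [he]

lemma pvWin_drop (s : List Char) (b e : Nat) : pvWin s (b + 1) e = (pvWin s b e).drop 1 := by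
  unfold pvWin
  rw [List.drop_drop]

lemma pvValid_of_le (s L : List Char) (b e : Nat) (h : e ≤ b) : pvValidB s L b e = true := by
  simp [pvValidB, pvWin_nil s b e h, pvCnt]

lemma pvValid_mono_left (s L : List Char) (b e : Nat) (h : pvValidB s L b e = true) :
    pvValidB s L (b + 1) e = true := by
  simp only [pvValidB, List.all_eq_true] at *
  intro j hj
  have := h j hj
  simp only [decide_eq_true_eq] at *
  calc pvCnt j (pvWin s (b+1) e) ≤ pvCnt j (pvWin s b e) := by
        rw [pvWin_drop]; exact (List.drop_sublist _ _).countP_le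
    _ ≤ pvCnt j L := this

lemma pvValidB_self (s L : List Char) (e : Nat) : pvValidB s L e e = true :=
  pvValid_of_le s L e e le_rfl

def pvMnb (s L : List Char) (e : Nat) : Nat :=
  Nat.find (⟨e, pvValidB_self s L e⟩ : ∃ b, pvValidB s L b e = true)

lemma pvMnb_le (s L : List Char) (b e : Nat) (h : pvValidB s L b e = true) : pvMnb s L e ≤ b :=
  Nat.find_min' _ h

lemma pvMnb_le_self (s L : List Char) (e : Nat) : pvMnb s L e ≤ e :=
  pvMnb_le s L e e (pvValidB_self s L e)

lemma pvValid_of_mnb_le (s L : List Char) (b e : Nat) (h : pvMnb s L e ≤ b) :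
    pvValidB s L b e = true := by
  induction b with
  | zero =>
    have h0 : pvMnb s L e = 0 := by omega
    have hs := Nat.find_spec (⟨e, pvValidB_self s L e⟩ : ∃ b, pvValidB s L b e = true)
    rw [show (Nat.find (⟨e, pvValidB_self s L e⟩ : ∃ b, pvValidB s L b e = true)) = pvMnb s L e from rfl, h0] at hs
    exact hs
  | succ b ih =>
    rcases Nat.lt_or_ge b (pvMnb s L e) with hlt | hge
    · have h1 : pvMnb s L e = b + 1 := by omega
      have hs := Nat.find_spec (⟨e, pvValidB_self s L e⟩ : ∃ b, pvValidB s L b e = true)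
      rw [show (Nat.find (⟨e, pvValidB_self s L e⟩ : ∃ b, pvValidB s L b e = true)) = pvMnb s L e from rfl, h1] at hs
      exact hs
    · exact pvValid_mono_left s L b e (ih hge)

lemma pvValid_snoc_rev (s L : List Char) (b e : Nat) (he : e < s.length)
    (h : pvValidB s L b (e + 1) = true) : pvValidB s L b e = true := by
  rcases Nat.lt_or_ge b (e + 1) with hb | hb
  · rcases Nat.lt_or_ge b e with hb' | hb'
    · simp only [pvValidB, List.all_eq_true] at *
      intro j hj
      have := h j hj
      simp only [decide_eq_true_eq] at *
      calc pvCnt j (pvWin s b e) ≤ pvCnt j (pvWin s b (e + 1)) := by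
            rw [pvWin_snoc s b e (by omega) he]
            unfold pvCnt; rw [List.countP_append]; omega
        _ ≤ pvCnt j L := this
    · exact pvValid_of_le s L b e hb'
  · exact pvValid_of_le s L b e (by omega)

lemma pvMnb_mono (s L : List Char) (e : Nat) (he : e < s.length) :
    pvMnb s L e ≤ pvMnb s L (e + 1) := by
  apply pvMnb_le
  apply pvValid_snoc_rev s L _ e he
  exact Nat.find_spec (⟨e + 1, pvValidB_self s L (e + 1)⟩ : ∃ b, pvValidB s L b (e + 1) = true)




lemma pvLoopA_inv (s L : List Char) (n : Nat) (hlen : n ≤ s.length)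
    (hgood : ∀ c ∈ s.take n, 71 ≤ c.toNat ∧ c.toNat ≤ 122) :
    ∀ (fuel : Nat) (result : Int) (b e : Nat) (subs : List Int),
      1 ≤ e → e ≤ n + 1 → b ≤ n →
      (n + 1 - e) + (n - b) ≤ fuel →
      (e ≤ n → pvValidB s L b (e - 1) = true) →
      (e ≤ n → b ≤ pvMnb s L e) →
      (e ≤ n → subs = pvHistL (pvWin s b e)) →
      pvLoopA s (n : Int) (pvHistL L) fuel result (b : Int) (e : Int) subs
        = result + ∑ e' ∈ Finset.Ico e (n + 1), ((e' : Int) - (pvMnb s L e' : Int)) := by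
  intro fuel
  induction fuel with
  | zero =>
    intro result b e subs h1 h2 h3 hfuel _ _ _
    have : e = n + 1 := by omega
    subst this
    simp [pvLoopA]
  | succ fuel ih =>
    intro result b e subs h1 h2 h3 hfuel hvb hble hsubs
    by_cases he : e ≤ n
    case neg =>
      have : e = n + 1 := by omega
      subst this
      rw [pvLoopA, if_neg (by push_cast; omega)]
      simp
    case pos =>
      have he1 : e - 1 < s.length := by omega
      have hch : PySem.List.pyGetD s ((e : Int) - 1) 'a' = s[e - 1]'he1 := by
        rw [show ((e : Int) - 1) = ((e - 1 : Nat) : Int) by omega, PySem.List.pyGetD_natCast,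
          List.getD_eq_getElem?_getD, List.getElem?_eq_getElem he1]
        rfl
      have hchg : 71 ≤ (s[e - 1]'he1).toNat ∧ (s[e - 1]'he1).toNat ≤ 122 := by
        have : s[e - 1]'he1 ∈ s.take n := by
          rw [show s[e - 1]'he1 = (s.take n)[e - 1]'(by simp; omega) from (List.getElem_take ..).symm]
          exact List.getElem_mem _
        exact hgood _ this
      have hsubs' := hsubs he
      have hGsub : PySem.List.pyGetD subs (((s[e - 1]'he1).toNat : Int) - 97) 0
          = (pvCnt (pvCls (s[e - 1]'he1)) (pvWin s b e) : Int) := by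
        rw [hsubs', pvGetD_hist _ (pvHistL_length _) _ hchg.1 hchg.2,
          pvHistL_getD _ _ (pvCls_lt _)]
      have hGcrd : PySem.List.pyGetD (pvHistL L) (((s[e - 1]'he1).toNat : Int) - 97) 0
          = (pvCnt (pvCls (s[e - 1]'he1)) L : Int) := by
        rw [pvGetD_hist _ (pvHistL_length _) _ hchg.1 hchg.2, pvHistL_getD _ _ (pvCls_lt _)]
      rw [pvLoopA, if_pos (by push_cast; omega)]
      simp only [hch, hGsub, hGcrd]
      by_cases hc : (pvCnt (pvCls (s[e - 1]'he1)) L : Int) < (pvCnt (pvCls (s[e - 1]'he1)) (pvWin s b e) : Int)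
      case pos =>
        rw [if_pos hc]
        have hnv : ¬ pvValidB s L b e = true := by
          simp only [pvValidB, List.all_eq_true]
          push Not
          refine ⟨pvCls (s[e - 1]'he1), by simpa using pvCls_lt _, by simpa using by exact_mod_cast hc⟩
        have hblt : b < pvMnb s L e := by
          rcases Nat.lt_or_ge b (pvMnb s L e) with h | h
          · exact h
          · exact absurd (pvValid_of_mnb_le s L b e h) hnv
        have hbe : b < e := lt_of_lt_of_le hblt (pvMnb_le_self s L e)
        have hbl : b < s.length := by omega
        have hgb : PySem.List.pyGetD s ((b : Int) + 1 - 1) 'a' = s[b]'hbl := by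
          rw [show ((b : Int) + 1 - 1) = ((b : Nat) : Int) by omega, PySem.List.pyGetD_natCast,
            List.getD_eq_getElem?_getD, List.getElem?_eq_getElem hbl]
          rfl
        have hgbg : 71 ≤ (s[b]'hbl).toNat ∧ (s[b]'hbl).toNat ≤ 122 := by
          have : s[b]'hbl ∈ s.take n := by
            rw [show s[b]'hbl = (s.take n)[b]'(by simp; omega) from (List.getElem_take ..).symm]
            exact List.getElem_mem _
          exact hgood _ this
        have hwc : pvWin s b e = s[b]'hbl :: pvWin s (b + 1) e := pvWin_cons s b e hbe (by omega)
        have hsubs2 : PySem.List.pySetD subs (((s[b]'hbl).toNat : Int) - 97)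
            (PySem.List.pyGetD subs (((s[b]'hbl).toNat : Int) - 97) 0 - 1) = pvHistL (pvWin s (b + 1) e) := by
          rw [hsubs', hwc]
          exact pvHistL_uncons _ _ hgbg.1 hgbg.2
        rw [show ((b : Int) + 1) = ((b + 1 : Nat) : Int) by omega] at *
        rw [hgb, hsubs2]
        exact ih result (b + 1) e _ h1 h2 (by omega) (by omega)
          (fun _ => pvValid_mono_left s L b (e - 1) (hvb he))
          (fun _ => hblt) (fun _ => rfl)
      case neg =>
        rw [if_neg hc]
        have hv : pvValidB s L b e = true := by
          rcases Nat.lt_or_ge b e with hbe | hbe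
          · have hwsn : pvWin s b e = pvWin s b (e - 1) ++ [s[e - 1]'he1] := by
              have := pvWin_snoc s b (e - 1) (by omega) he1
              rwa [show e - 1 + 1 = e by omega] at this
            simp only [pvValidB, List.all_eq_true]
            intro j hj
            simp only [decide_eq_true_eq]
            have hvb' := hvb he
            simp only [pvValidB, List.all_eq_true] at hvb'
            have hj' := hvb' j hj
            simp only [decide_eq_true_eq] at hj'
            by_cases hje : j = pvCls (s[e - 1]'he1)
            · subst hje; exact_mod_cast not_lt.mp hc
            · rw [hwsn]
              unfold pvCnt at *
              rw [List.countP_append]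
              have : (decide (pvCls (s[e - 1]'he1) = j)) = false := by
                simpa using fun hh => hje hh.symm
              simp [this]
              omega
          · exact pvValid_of_le s L b e hbe
        have hbeq : b = pvMnb s L e := le_antisymm (hble he) (pvMnb_le s L b e hv)
        have hstep : ∀ subs', ((e + 1 : Nat) ≤ n → subs' = pvHistL (pvWin s b (e + 1))) →
            pvLoopA s (n : Int) (pvHistL L) fuel (result + (e : Int) - (b : Int)) (b : Int) ((e + 1 : Nat) : Int) subs'
              = (result + (e : Int) - (b : Int)) + ∑ e' ∈ Finset.Ico (e + 1) (n + 1), ((e' : Int) - (pvMnb s L e' : Int)) := by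
          intro subs' hs'
          exact ih _ b (e + 1) subs' (by omega) (by omega) h3 (by omega)
            (fun _ => by simpa using hv)
            (fun hh => by
              rw [hbeq]
              exact pvMnb_mono s L e (by omega))
            hs'
        rw [show ((e : Int) + 1) = ((e + 1 : Nat) : Int) by omega]
        by_cases hen : e < n
        case pos =>
          have hel : e < s.length := by omega
          have hge : PySem.List.pyGetD s (((e + 1 : Nat) : Int) - 1) 'a' = s[e]'hel := by
            rw [show (((e + 1 : Nat) : Int) - 1) = ((e : Nat) : Int) by omega, PySem.List.pyGetD_natCast,
              List.getD_eq_getElem?_getD, List.getElem?_eq_getElem hel]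
            rfl
          have hgeg : 71 ≤ (s[e]'hel).toNat ∧ (s[e]'hel).toNat ≤ 122 := by
            have : s[e]'hel ∈ s.take n := by
              rw [show s[e]'hel = (s.take n)[e]'(by simp; omega) from (List.getElem_take ..).symm]
              exact List.getElem_mem _
            exact hgood _ this
          rw [if_pos (by push_cast; omega), hge]
          have hb2 : PySem.List.pySetD subs (((s[e]'hel).toNat : Int) - 97)
              (PySem.List.pyGetD subs (((s[e]'hel).toNat : Int) - 97) 0 + 1) = pvHistL (pvWin s b (e + 1)) := by
            rw [hsubs', pvHistL_snoc _ _ hgeg.1 hgeg.2, ← pvWin_snoc s b e (hbeq ▸ pvMnb_le_self s L e) hel]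
          rw [hb2, hstep _ (fun _ => rfl)]
          conv_rhs => rw [Finset.sum_eq_sum_Ico_succ_bot (show e < n + 1 by omega)]
          rw [hbeq]; ring
        case neg =>
          rw [if_neg (by push_cast; omega)]
          rw [hstep subs (fun hh => absurd hh (by omega))]
          conv_rhs => rw [Finset.sum_eq_sum_Ico_succ_bot (show e < n + 1 by omega)]
          rw [hbeq]; ring

lemma pvCnt_big (j : Nat) (hj : 26 ≤ j) (w : List Char) : pvCnt j w = 0 := by
  unfold pvCnt
  rw [List.countP_eq_zero]
  intro c _
  simpa using fun h => absurd (h ▸ pvCls_lt c) (by omega)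

lemma pvAllCheck (L w : List Char) :
    ((PySem.List.pyRange 0 26 1).all
      (fun j => PySem.List.pyGetD (pvHistL w) j 0 ≤ PySem.List.pyGetD (pvHistL L) j 0))
    = (List.range 26).all (fun j => pvCnt j w ≤ pvCnt j L) := by
  rw [show (26 : Int) = ((26 : Nat) : Int) by norm_num, PySem.List.pyRange_zero_natCast,
    List.all_map]
  apply List.all_congr rfl
  intro j
  simp only [Function.comp, PySem.List.pyGetD_natCast, List.getD_eq_getElem?_getD]
  by_cases hj26 : j < 26
  · rw [show (pvHistL w)[j]? = some ((pvCnt j w : Int)) by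
        rw [List.getElem?_eq_getElem (by simpa [pvHistL_length] using hj26)]
        simp [pvHistL],
      show (pvHistL L)[j]? = some ((pvCnt j L : Int)) by
        rw [List.getElem?_eq_getElem (by simpa [pvHistL_length] using hj26)]
        simp [pvHistL]]
    simp
  · rw [List.getElem?_eq_none (by simp [pvHistL]; omega), List.getElem?_eq_none (by simp [pvHistL]; omega)]
    simp [pvCnt_big j (by omega)]

lemma pvInnerB (s L : List Char) (n : Nat) (hlen : n ≤ s.length)
    (hgood : ∀ c ∈ s.take n, 71 ≤ c.toNat ∧ c.toNat ≤ 122)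
    (crds : List Int) (hcrds : crds = pvHistL L) (b : Nat) (hb : b ≤ n) :
    ∀ (k e0 : Nat), n - e0 ≤ k → b ≤ e0 → e0 ≤ n → ∀ (r : Int) (subs : List Int),
      subs = pvHistL (pvWin s b e0) →
      ((PySem.List.pyRange (e0 : Int) (n : Int) 1).foldl (fun st en =>
          let subs_hist := PySem.List.pySetD st.1 (((PySem.List.pyGetD s en 'a').toNat : Int) - 97)
            (PySem.List.pyGetD st.1 (((PySem.List.pyGetD s en 'a').toNat : Int) - 97) 0 + 1)
          if (PySem.List.pyRange 0 26 1).all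
              (fun j => PySem.List.pyGetD subs_hist j 0 ≤ PySem.List.pyGetD crds j 0)
          then (subs_hist, st.2 + 1) else (subs_hist, st.2)) (subs, r)).2
        = r + ∑ e' ∈ Finset.Ico (e0 + 1) (n + 1), (if pvValidB s L b e' = true then (1 : Int) else 0) := by
  subst hcrds
  intro k
  induction k with
  | zero =>
    intro e0 hk hbe he0 r subs hsubs
    rw [show PySem.List.pyRange (e0 : Int) (n : Int) 1 = [] from PySem.List.pyRange_one_eq_nil (by omega)]
    rw [Finset.Ico_eq_empty (by omega)]
    simp
  | succ k ih =>
    intro e0 hk hbe he0 r subs hsubs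
    rcases Nat.eq_or_lt_of_le he0 with heq | hlt
    · subst heq
      rw [show PySem.List.pyRange (e0 : Int) (e0 : Int) 1 = [] from PySem.List.pyRange_one_eq_nil le_rfl]
      rw [Finset.Ico_eq_empty (by omega)]
      simp
    · have hel : e0 < s.length := by omega
      rw [show PySem.List.pyRange (e0 : Int) (n : Int) 1 = (e0 : Int) :: PySem.List.pyRange ((e0 : Int) + 1) (n : Int) 1 from PySem.List.pyRange_one_cons (by exact_mod_cast hlt), List.foldl_cons]
      have hge : PySem.List.pyGetD s ((e0 : Nat) : Int) 'a' = s[e0]'hel := by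
        rw [PySem.List.pyGetD_natCast, List.getD_eq_getElem?_getD, List.getElem?_eq_getElem hel]
        rfl
      have hgeg : 71 ≤ (s[e0]'hel).toNat ∧ (s[e0]'hel).toNat ≤ 122 := by
        have : s[e0]'hel ∈ s.take n := by
          rw [show s[e0]'hel = (s.take n)[e0]'(by simp; omega) from (List.getElem_take ..).symm]
          exact List.getElem_mem _
        exact hgood _ this
      simp only [hge, hsubs]
      rw [pvHistL_snoc _ _ hgeg.1 hgeg.2, ← pvWin_snoc s b e0 hbe hel]
      rw [pvAllCheck L (pvWin s b (e0 + 1))]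
      rw [show ((List.range 26).all fun j => decide (pvCnt j (pvWin s b (e0 + 1)) ≤ pvCnt j L)) = pvValidB s L b (e0 + 1) from rfl]
      have hrange : ((e0 : Int) + 1) = (((e0 + 1 : Nat)) : Int) := by omega
      by_cases hvv : pvValidB s L b (e0 + 1) = true
      · rw [if_pos hvv, hrange]
        rw [ih (e0 + 1) (by omega) (by omega) (by omega) (r + 1) _ rfl]
        conv_rhs => rw [Finset.sum_eq_sum_Ico_succ_bot (show e0 + 1 < n + 1 by omega)]
        rw [if_pos hvv]; ring
      · rw [if_neg hvv, hrange]
        rw [ih (e0 + 1) (by omega) (by omega) (by omega) r _ rfl]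
        conv_rhs => rw [Finset.sum_eq_sum_Ico_succ_bot (show e0 + 1 < n + 1 by omega)]
        rw [if_neg hvv]; ring

lemma pvOuterB (s L : List Char) (n : Nat) (hlen : n ≤ s.length)
    (hgood : ∀ c ∈ s.take n, 71 ≤ c.toNat ∧ c.toNat ≤ 122)
    (crds : List Int) (hcrds : crds = pvHistL L) :
    ∀ (k b0 : Nat), n - b0 ≤ k → b0 ≤ n → ∀ (r : Int),
      ((PySem.List.pyRange (b0 : Int) (n : Int) 1).foldl (fun result beg =>
        ((PySem.List.pyRange beg (n : Int) 1).foldl (fun st en =>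
            let subs_hist := PySem.List.pySetD st.1 (((PySem.List.pyGetD s en 'a').toNat : Int) - 97)
              (PySem.List.pyGetD st.1 (((PySem.List.pyGetD s en 'a').toNat : Int) - 97) 0 + 1)
            if (PySem.List.pyRange 0 26 1).all
                (fun j => PySem.List.pyGetD subs_hist j 0 ≤ PySem.List.pyGetD crds j 0)
            then (subs_hist, st.2 + 1) else (subs_hist, st.2))
          (List.replicate 26 0, result)).2) r)
        = r + ∑ b ∈ Finset.Ico b0 n, ∑ e' ∈ Finset.Ico (b + 1) (n + 1),
            (if pvValidB s L b e' = true then (1 : Int) else 0) := by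
  subst hcrds
  intro k
  induction k with
  | zero =>
    intro b0 hk hb0 r
    rw [show PySem.List.pyRange (b0 : Int) (n : Int) 1 = [] from PySem.List.pyRange_one_eq_nil (by omega)]
    rw [Finset.Ico_eq_empty (by omega)]
    simp
  | succ k ih =>
    intro b0 hk hb0 r
    rcases Nat.eq_or_lt_of_le hb0 with heq | hlt
    · subst heq
      rw [show PySem.List.pyRange (b0 : Int) (b0 : Int) 1 = [] from PySem.List.pyRange_one_eq_nil le_rfl]
      rw [Finset.Ico_eq_empty (by omega)]
      simp
    · rw [show PySem.List.pyRange (b0 : Int) (n : Int) 1 = (b0 : Int) :: PySem.List.pyRange ((b0 : Int) + 1) (n : Int) 1 from PySem.List.pyRange_one_cons (by exact_mod_cast hlt), List.foldl_cons]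
      rw [pvInnerB s L n hlen hgood (pvHistL L) rfl b0 (by omega) n b0 (by omega) le_rfl (by omega) r
        (List.replicate 26 0) (by rw [pvWin_nil s b0 b0 le_rfl, pvHistL_nil])]
      rw [show ((b0 : Int) + 1) = (((b0 + 1 : Nat)) : Int) by omega]
      rw [ih (b0 + 1) (by omega) (by omega) _]
      conv_rhs => rw [show Finset.Ico b0 n = insert b0 (Finset.Ico (b0 + 1) n) from (Finset.insert_Ico_add_one_left_eq_Ico hlt).symm]
      rw [Finset.sum_insert (by simp)]
      ring

lemma pvDouble (s L : List Char) (n : Nat) :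
    ∑ e ∈ Finset.Ico 1 (n + 1), ((e : Int) - (pvMnb s L e : Int))
      = ∑ b ∈ Finset.Ico 0 n, ∑ e ∈ Finset.Ico (b + 1) (n + 1),
          (if pvValidB s L b e = true then (1 : Int) else 0) := by
  have step1 : ∀ e ∈ Finset.Ico 1 (n + 1), ((e : Int) - (pvMnb s L e : Int))
      = ∑ b ∈ Finset.Ico 0 n, (if b < e ∧ pvValidB s L b e = true then (1 : Int) else 0) := by
    intro e he
    simp only [Finset.mem_Ico] at he
    have hfil : {b ∈ Finset.Ico 0 n | b < e ∧ pvValidB s L b e = true}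
        = Finset.Ico (pvMnb s L e) e := by
      apply Finset.ext
      intro b
      simp only [Finset.mem_filter, Finset.mem_Ico]
      constructor
      · rintro ⟨⟨_, _⟩, hbe, hv⟩
        exact ⟨pvMnb_le s L b e hv, hbe⟩
      · rintro ⟨hmb, hbe⟩
        exact ⟨⟨Nat.zero_le b, by omega⟩, hbe, pvValid_of_mnb_le s L b e hmb⟩
    rw [Finset.sum_boole, hfil, Nat.card_Ico]
    have := pvMnb_le_self s L e
    omega
  rw [Finset.sum_congr rfl step1, Finset.sum_comm]
  apply Finset.sum_congr rfl
  intro b hb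
  simp only [Finset.mem_Ico] at hb
  rw [← Finset.sum_subset (show Finset.Ico (b + 1) (n + 1) ⊆ Finset.Ico 1 (n + 1) by
      apply Finset.Ico_subset_Ico <;> omega)
    (by
      intro e he hne
      simp only [Finset.mem_Ico] at he hne
      rw [if_neg]
      rintro ⟨hbe, -⟩
      omega)]
  apply Finset.sum_congr rfl
  intro e he
  simp only [Finset.mem_Ico] at he
  by_cases hv : pvValidB s L b e = true
  · rw [if_pos ⟨by omega, hv⟩, if_pos hv]
  · rw [if_neg (by rintro ⟨-, h⟩; exact hv h), if_neg hv]

-- ===== VERDICT (by name: the statement is the Claim_ definition above) =====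
theorem calc_substr_count_spec : Claim_equal_calc_substr_count := by
  intro string strlen cards _ hpre
  obtain ⟨hne, hlen, hcardsb, hstrb⟩ := hpre
  have hcards : ∀ c ∈ cards.toList, 71 ≤ c.toNat ∧ c.toNat ≤ 122 := by
    intro c hc
    have := List.all_eq_true.mp hcardsb c hc
    simpa using this
  have hstr : ∀ c ∈ string.toList.take (max 1 strlen.toNat), 71 ≤ c.toNat ∧ c.toNat ≤ 122 := by
    intro c hc
    have := List.all_eq_true.mp hstrb c hc
    simpa using this
  unfold Spec_calc_substr_count
  by_cases h1 : 1 ≤ strlen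
  case neg =>
    simp only [calc_substr_count, calc_substr_count_alt]
    rw [show PySem.List.pyRange 0 strlen 1 = [] from PySem.List.pyRange_one_eq_nil (by omega)]
    rw [pvLoopA, if_neg (by omega)]
    rfl
  case pos =>
    have h0 : 0 < string.toList.length := List.length_pos_iff.mpr hne
    have hn : strlen = ((strlen.toNat : Nat) : Int) := (Int.toNat_of_nonneg (by omega)).symm
    set s := string.toList with hs
    set L := cards.toList with hL
    set n := strlen.toNat with hndef
    have hn1 : 1 ≤ n := by omega
    have hlen' : n ≤ s.length := by omega
    have hgood : ∀ c ∈ s.take n, 71 ≤ c.toNat ∧ c.toNat ≤ 122 := by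
      have hmx : max 1 strlen.toNat = n := by omega
      rw [← hmx]
      exact hstr
    have hcl : count_letters L = pvHistL L := by rw [count_letters]; exact pvFoldl_bump L hcards
    have hg0 : 71 ≤ (s[0]'h0).toNat ∧ (s[0]'h0).toNat ≤ 122 := by
      have : s[0]'h0 ∈ s.take n := by
        rw [show s[0]'h0 = (s.take n)[0]'(by simp; omega) from (List.getElem_take ..).symm]
        exact List.getElem_mem _
      exact hgood _ this
    have hhead : ((PySem.List.pyGet? s 0).map (fun c => [c])).getD [] = [s[0]'h0] := by
      rw [PySem.List.pyGet?_zero, List.getElem?_eq_getElem h0]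
      rfl
    have hwin01 : pvWin s 0 1 = [s[0]'h0] := by
      rw [show (1 : Nat) = 0 + 1 from rfl, pvWin_snoc s 0 0 le_rfl h0, pvWin_nil s 0 0 le_rfl]
      rfl
    have hsub0 : count_letters [s[0]'h0] = pvHistL (pvWin s 0 1) := by
      rw [count_letters, pvFoldl_bump _ (by intro c hc; simp at hc; subst hc; exact hg0), hwin01]
    simp only [calc_substr_count, calc_substr_count_alt, ← hs, ← hL, hcl, hhead, hsub0]
    rw [hn]
    have HA := pvLoopA_inv s L n hlen' hgood ((2 * (n : Int) + 2).toNat + 1) 0 0 1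
      (pvHistL (pvWin s 0 1)) le_rfl (by omega) (by omega) (by omega)
      (fun _ => pvValid_of_le s L 0 0 le_rfl) (fun _ => Nat.zero_le _) (fun _ => rfl)
    have HB := pvOuterB s L n hlen' hgood _ (pvFoldl_bump L hcards) n 0 (by omega) (by omega) 0
    simp only [Nat.cast_zero, Nat.cast_one] at HA HB
    rw [HA, pvDouble s L n]
    exact HB.symm
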